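-- pv_equiv track=rewrite | github.com/ThomasBoxall/uni-programming | 01-L5/M21270-DSALG/2023-11-27-lab/ex2.py | modulo_hashing_analysis
-- ===== SOURCE A (Python) =====
-- def modulo_hashing_analysis(keys, m_values):
--     analysis_results = {}
--     for m in m_values:
--         hash_table = [0] * m
--         for key in keys:
--             hash_table[key % m] += 1
--         # Count collisions (slots with more than one key)
--         collisions = sum(1 for slot in hash_table if slot > 1)
--         analysis_results[m] = (collisions, m)
--     return analysis_results
-- ===== SOURCE B (Python) =====
-- def modulo_hashing_analysis(keys, m_values):
--     analysis_results = {}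
--     for m in m_values:
--         rs = sorted(key % m for key in keys)
--         # one sweep over the sorted remainders: each run of equal values
--         # longer than 1 is one colliding slot
--         collisions = 0
--         i = 0
--         while i < len(rs):
--             j = i + 1
--             while j < len(rs) and rs[j] == rs[i]:
--                 j += 1
--             if j - i > 1:
--                 collisions += 1
--             i = j
--         analysis_results[m] = (collisions, m)
--     return analysis_results
-- ===== Notes on version B (the rewrite author's own statement) =====
-- stated objective: alternative
-- what changed: Replaces A's size-m bucket array (allocated and fully scanned per modulus) with sort-then-group counting: the remainders are sorted and one sweep counts each run of equal values longer than 1 as one collision, so no m-sized structure exists at all.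
import Mathlib
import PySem

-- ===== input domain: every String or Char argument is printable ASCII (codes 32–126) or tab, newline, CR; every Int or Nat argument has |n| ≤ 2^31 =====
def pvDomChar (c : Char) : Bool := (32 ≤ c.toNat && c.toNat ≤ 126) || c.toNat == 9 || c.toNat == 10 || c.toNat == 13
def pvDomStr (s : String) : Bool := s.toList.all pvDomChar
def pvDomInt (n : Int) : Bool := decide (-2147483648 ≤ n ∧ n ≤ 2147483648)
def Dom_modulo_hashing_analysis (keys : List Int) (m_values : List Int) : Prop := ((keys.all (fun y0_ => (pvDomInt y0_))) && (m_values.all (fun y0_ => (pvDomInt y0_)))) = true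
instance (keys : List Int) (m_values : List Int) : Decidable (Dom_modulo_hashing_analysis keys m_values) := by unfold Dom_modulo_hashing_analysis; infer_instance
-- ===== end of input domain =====

-- B replaces A's size-m bucket array with sort-then-group counting over the remainders
-- (alternative decomposition: no m-sized structure at all).

-- ===== PORT A =====
-- hash_table[key % m] += 1  (read then write; pyGetD/pySetD are the total forms, in range under Pre_)
def pvAStep (m : Int) (t : List Int) (key : Int) : List Int :=
  PySem.List.pySetD t (PySem.Int.mod key m) (PySem.List.pyGetD t (PySem.Int.mod key m) 0 + 1)

-- collisions for one m: build [0]*m, bump per key, then sum(1 for slot in table if slot > 1)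
def pvColA (keys : List Int) (m : Int) : Int :=
  (keys.foldl (pvAStep m) (List.replicate m.toNat 0)).foldl
    (fun acc slot => if slot > 1 then acc + 1 else acc) 0

def modulo_hashing_analysis (keys : List Int) (m_values : List Int) : List (Int × Int × Int) :=
  (m_values.foldl (fun d m => d.insert m (pvColA keys m, m))
    (PySem.Dict.empty : PySem.Dict Int (Int × Int))).items

-- ===== PORT B =====
-- the sweep over the sorted remainders: each maximal run is one group; a run longer
-- than 1 contributes one collision (structural recursion form of Source B's index sweep)
def pvGroups : List Int → Int
  | [] => 0
  | x :: xs =>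
      (if ((xs.takeWhile (fun y => y == x)).length : Int) + 1 > 1 then 1 else 0)
        + pvGroups (xs.dropWhile (fun y => y == x))
termination_by l => l.length
decreasing_by
  have := (List.dropWhile_sublist (p := fun y => y == x) (l := xs)).length_le
  simp
  omega

-- collisions for one m: rs = sorted(key % m for key in keys); sweep rs once
def pvColB (keys : List Int) (m : Int) : Int :=
  pvGroups (PySem.List.sorted (keys.map (fun k => PySem.Int.mod k m)) (fun x => x) false)

def modulo_hashing_analysis_alt (keys : List Int) (m_values : List Int) : List (Int × Int × Int) :=
  (m_values.foldl (fun d m => d.insert m (pvColB keys m, m))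
    (PySem.Dict.empty : PySem.Dict Int (Int × Int))).items

-- ===== PRECONDITION & SPEC =====
-- A raises when keys is non-empty and some modulus is ≤ 0 (ZeroDivisionError on key % 0,
-- IndexError on the empty bucket array for m < 0); with keys = [] no indexing happens and any m is fine.
def Pre_modulo_hashing_analysis (keys : List Int) (m_values : List Int) : Prop :=
  keys = [] ∨ ∀ m ∈ m_values, 0 < m
instance (keys : List Int) (m_values : List Int) : Decidable (Pre_modulo_hashing_analysis keys m_values) := by unfold Pre_modulo_hashing_analysis; infer_instance
def pvWitness_modulo_hashing_analysis : List Int × List Int := ([1, 2, 3, 11, 21], [10, 5, 3])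

def Spec_modulo_hashing_analysis (keys : List Int) (m_values : List Int) (out : List (Int × Int × Int)) : Prop := out = modulo_hashing_analysis_alt keys m_values
instance (keys : List Int) (m_values : List Int) (out : List (Int × Int × Int)) : Decidable (Spec_modulo_hashing_analysis keys m_values out) := by unfold Spec_modulo_hashing_analysis; infer_instance

-- ===== CLAIM (what is proved, stated in full; the proofs are below) =====
def Claim_equal_modulo_hashing_analysis : Prop := ∀ (keys : List Int) (m_values : List Int), Dom_modulo_hashing_analysis keys m_values → Pre_modulo_hashing_analysis keys m_values → Spec_modulo_hashing_analysis keys m_values (modulo_hashing_analysis keys m_values)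

-- ===== LEMMAS AND PROOFS =====

-- the remainders of keys modulo m
def pvRems (keys : List Int) (m : Int) : List Int := keys.map (fun k => PySem.Int.mod k m)

-- getD of set, needed for the bucket-table invariant
lemma pv_getD_set (t : List Int) (n : Nat) (v : Int) (j : Nat) (hn : n < t.length) :
    (t.set n v).getD j 0 = if j = n then v else t.getD j 0 := by
  rcases Nat.lt_or_ge j t.length with h | h
  · rw [List.getD_eq_getElem _ _ (by simpa using h), List.getD_eq_getElem _ _ h, List.getElem_set]
    split_ifs with h1 h2 <;> first | rfl | omega
  · rw [List.getD_eq_default _ _ (by simpa using h), List.getD_eq_default _ _ h]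
    split_ifs with h1 <;> [omega; rfl]

lemma pv_tableA_length (m : Int) (keys t : List Int) :
    (keys.foldl (pvAStep m) t).length = t.length := by
  induction keys generalizing t with
  | nil => rfl
  | cons k ks ih =>
      simp only [List.foldl_cons, ih]
      simp [pvAStep, PySem.List.length_pySetD]

-- invariant of A's inner loop: slot j holds its start value plus the number of keys hashing to j
lemma pv_tableA_getD (m : Int) (hm : 0 < m) (keys : List Int) (t : List Int)
    (ht : t.length = m.toNat) (j : Nat) :
    (keys.foldl (pvAStep m) t).getD j 0 = t.getD j 0 + ((pvRems keys m).count (j : Int) : Int) := by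
  induction keys generalizing t with
  | nil => simp [pvRems]
  | cons k ks ih =>
      have h0 : 0 ≤ PySem.Int.mod k m := PySem.Int.mod_nonneg k hm
      have hmlt : PySem.Int.mod k m < m := PySem.Int.mod_lt k hm
      have h1 : PySem.Int.mod k m < (t.length : Int) := by rw [ht]; omega
      have hset : pvAStep m t k = t.set (PySem.Int.mod k m).toNat (t.getD (PySem.Int.mod k m).toNat 0 + 1) := by
        rw [pvAStep, PySem.List.pySetD_of_nonneg t _ h0, PySem.List.pyGetD_eq_getElem t 0 h0 h1,
          List.getD_eq_getElem _ _ (by omega)]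
      rw [List.foldl_cons, hset, ih _ (by rw [List.length_set, ht]),
        pv_getD_set _ _ _ _ (by omega)]
      have hcount : ((pvRems (k :: ks) m).count (j : Int) : Int)
          = ((pvRems ks m).count (j : Int) : Int)
            + (if (j : Int) = PySem.Int.mod k m then 1 else 0) := by
        by_cases h : (j : Int) = PySem.Int.mod k m
        · simp [pvRems, h]
        · simp [pvRems, h, Ne.symm h]
      rw [hcount]
      have hiff : j = (PySem.Int.mod k m).toNat ↔ (j : Int) = PySem.Int.mod k m := by omega
      split_ifs with h2 h3 h4 <;>
        first
        | (exfalso; exact h3 (hiff.mp h2))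
        | (exfalso; exact h2 (hiff.mpr h4))
        | (try subst h2); ring

-- A's bucket table is exactly the per-slot remainder counts
lemma pv_tableA_eq_map (keys : List Int) (m : Int) (hm : 0 < m) :
    keys.foldl (pvAStep m) (List.replicate m.toNat 0)
      = (List.range m.toNat).map (fun j : Nat => ((pvRems keys m).count ((j : Nat) : Int) : Int)) := by
  apply List.ext_getElem
  · simp [pv_tableA_length]
  · intro j h1 h2
    have hj : j < m.toNat := by simpa [pv_tableA_length] using h1
    rw [← List.getD_eq_getElem _ 0 h1,
      pv_tableA_getD m hm keys _ (by simp) j, List.getElem_map, List.getElem_range]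
    have hrep : (List.replicate m.toNat (0 : Int)).getD j 0 = 0 := by
      rw [List.getD_eq_getElem _ _ (by simpa using hj)]; simp
    rw [hrep, zero_add]

-- A's collision count for one positive modulus, as a countP over range(m)
lemma pv_colA_eq (keys : List Int) (m : Int) (hm : 0 < m) :
    pvColA keys m
      = ((List.range m.toNat).countP
          (fun j : Nat => decide (((pvRems keys m).count ((j : Nat) : Int) : Int) > 1)) : Int) := by
  rw [pvColA, PySem.List.foldl_ite_add_one (fun slot => slot > 1), pv_tableA_eq_map keys m hm,
    List.countP_map, zero_add]
  rfl

-- bridge: counting over-full slots over range(m) = counting them over the distinct remainders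
lemma pv_countP_range_eq (m : Int) (hm : 0 < m) (rems : List Int)
    (hr : ∀ r ∈ rems, 0 ≤ r ∧ r < m) :
    (List.range m.toNat).countP (fun j : Nat => decide ((rems.count ((j : Nat) : Int) : Int) > 1))
      = (PySem.Set.ofList rems).countP (fun k => decide ((rems.count k : Int) > 1)) := by
  have hmem : ∀ (k : Int), decide ((rems.count k : Int) > 1) = true → k ∈ rems := by
    intro k hk
    have : 0 < rems.count k := by simp at hk; omega
    exact List.count_pos_iff.mp this
  rw [List.countP_eq_length_filter, List.countP_eq_length_filter]
  have hmap : ((List.range m.toNat).filter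
        (fun j : Nat => decide ((rems.count ((j : Nat) : Int) : Int) > 1))).map (fun j : Nat => (j : Int))
      = ((List.range m.toNat).map (fun j : Nat => (j : Int))).filter
          (fun k => decide ((rems.count k : Int) > 1)) := by
    rw [List.filter_map]; rfl
  have hlen1 : ((List.range m.toNat).filter
        (fun j : Nat => decide ((rems.count ((j : Nat) : Int) : Int) > 1))).length
      = (((List.range m.toNat).map (fun j : Nat => (j : Int))).filter
          (fun k => decide ((rems.count k : Int) > 1))).length := by
    rw [← hmap, List.length_map]
  rw [hlen1]
  have hnd1 : (((List.range m.toNat).map (fun j : Nat => (j : Int))).filter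
      (fun k => decide ((rems.count k : Int) > 1))).Nodup :=
    (List.Nodup.map (fun a b => by omega) (List.nodup_range)).filter _
  have hnd2 : ((PySem.Set.ofList rems).filter
      (fun k => decide ((rems.count k : Int) > 1))).Nodup :=
    (PySem.Set.nodup_ofList rems).filter _
  rw [← List.toFinset_card_of_nodup hnd1, ← List.toFinset_card_of_nodup hnd2]
  congr 1
  ext k
  simp only [List.mem_toFinset, List.mem_filter, List.mem_map, List.mem_range]
  constructor
  · rintro ⟨⟨j, hj, rfl⟩, hp⟩
    exact ⟨(PySem.Set.mem_ofList rems _).mpr (hmem _ hp), hp⟩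
  · rintro ⟨hk, hp⟩
    have hkr : k ∈ rems := (PySem.Set.mem_ofList rems k).mp hk
    obtain ⟨h0, h1⟩ := hr k hkr
    exact ⟨⟨k.toNat, by omega, by omega⟩, hp⟩

-- in a nondecreasing list x :: xs, everything left after dropping the leading run of x is > x
lemma pv_dropWhile_gt (xs : List Int) (x : Int) (h : (x :: xs).Pairwise (· ≤ ·)) :
    ∀ y ∈ xs.dropWhile (fun y => y == x), x < y := by
  induction xs with
  | nil => intro y hy; simp [List.dropWhile] at hy
  | cons z t ih =>
      rcases List.pairwise_cons.mp h with ⟨hx, hzt⟩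
      by_cases hz : z = x
      · subst hz
        have hpair : (z :: t).Pairwise (· ≤ ·) := by
          rw [List.pairwise_cons]
          exact ⟨fun y hy => hx y (List.mem_cons_of_mem _ hy), (List.pairwise_cons.mp hzt).2⟩
        intro y hy
        rw [List.dropWhile_cons_of_pos (by simp)] at hy
        exact ih hpair y hy
      · intro y hy
        rw [List.dropWhile_cons_of_neg (by simp [hz])] at hy
        rcases List.mem_cons.mp hy with rfl | hy'
        · exact lt_of_le_of_ne (hx y (List.mem_cons_self)) (fun e => hz e.symm)
        · have hzy : z ≤ y := (List.pairwise_cons.mp hzt).1 y hy'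
          have hxz : x ≤ z := hx z List.mem_cons_self
          have : x ≠ z := hz ∘ Eq.symm
          omega

-- everything in the leading run equals x
lemma pv_takeWhile_eq (xs : List Int) (x : Int) :
    ∀ y ∈ xs.takeWhile (fun y => y == x), y = x := by
  intro y hy
  have := List.mem_takeWhile_imp hy
  simpa using this

-- the sweep over a sorted list counts the distinct values occurring more than once
lemma pv_groups_sorted (rs : List Int) (h : rs.Pairwise (· ≤ ·)) :
    pvGroups rs
      = ((PySem.Set.ofList rs).countP (fun k => decide ((rs.count k : Int) > 1)) : Int) := by
  induction rs using pvGroups.induct with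
  | case1 => simp [pvGroups]
  | case2 x xs ih =>
      rcases List.pairwise_cons.mp h with ⟨hx, hxs⟩
      set run := xs.takeWhile (fun y => y == x) with hrun
      set tl := xs.dropWhile (fun y => y == x) with htl
      have hsplit : xs = run ++ tl := (List.takeWhile_append_dropWhile).symm
      have hgt : ∀ y ∈ tl, x < y := pv_dropWhile_gt xs x h
      have hrx : ∀ y ∈ run, y = x := pv_takeWhile_eq xs x
      have htlp : tl.Pairwise (· ≤ ·) :=
        hxs.sublist (List.dropWhile_sublist _)
      -- counts in rs = x :: run ++ tl
      have hcount_x : (x :: xs).count x = run.length + 1 := by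
        rw [hsplit, List.count_cons_self, List.count_append]
        have h1 : run.count x = run.length := by
          rw [List.count_eq_length]
          intro y hy; exact ((hrx y hy) ▸ rfl)
        have h2 : tl.count x = 0 := by
          rw [List.count_eq_zero]
          intro hmem; exact absurd (hgt x hmem) (lt_irrefl x)
        omega
      have hcount_ne : ∀ k : Int, k ≠ x → (x :: xs).count k = tl.count k := by
        intro k hk
        have hrk : run.count k = 0 := by
          rw [List.count_eq_zero]
          intro hmem; exact hk (hrx k hmem)
        rw [hsplit]
        simp [List.count_append, hrk, Ne.symm hk]
      -- the distinct values: x plus those of tl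
      have hnd1 : (PySem.Set.discard (PySem.Set.ofList xs) x).Nodup :=
        PySem.Set.nodup_discard _ _ (PySem.Set.nodup_ofList xs)
      have hperm : (PySem.Set.discard (PySem.Set.ofList xs) x).Perm (PySem.Set.ofList tl) := by
        rw [List.perm_ext_iff_of_nodup hnd1 (PySem.Set.nodup_ofList tl)]
        intro k
        rw [PySem.Set.mem_discard, PySem.Set.mem_ofList, PySem.Set.mem_ofList]
        constructor
        · rintro ⟨hk, hne⟩
          rw [hsplit, List.mem_append] at hk
          rcases hk with hk | hk
          · exact absurd (hrx k hk) hne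
          · exact hk
        · intro hk
          exact ⟨hsplit ▸ List.mem_append_right _ hk, fun e => absurd (e ▸ hgt k hk) (lt_irrefl x)⟩
      have hcongr : (PySem.Set.ofList tl).countP (fun k => decide (((x :: xs).count k : Int) > 1))
          = (PySem.Set.ofList tl).countP (fun k => decide ((tl.count k : Int) > 1)) := by
        apply List.countP_congr
        intro k hk
        have hkmem : k ∈ tl := (PySem.Set.mem_ofList tl k).mp hk
        rw [hcount_ne k (fun e => absurd (e ▸ hgt k hkmem) (lt_irrefl x))]
      have hifx : (if ((run.length : Int) + 1 > 1) then (1:Int) else 0)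
          = (if decide (((x :: xs).count x : Int) > 1) = true then (1:Int) else 0) := by
        rw [hcount_x]
        by_cases hr0 : run.length = 0
        · simp [hr0]
        · have h1 : ((run.length : Int) + 1) > 1 := by omega
          simp [h1]
      rw [pvGroups, ← hrun, ← htl, ih htlp, PySem.Set.ofList_cons, List.countP_cons,
        hperm.countP_eq, hcongr]
      push_cast
      rw [hifx]
      split_ifs <;> omega

-- the per-modulus collision counts agree
lemma pv_col_eq (keys : List Int) (m : Int) (h : 0 < m ∨ keys = []) :
    pvColA keys m = pvColB keys m := by
  rcases h with hm | rfl
  · have hperm : (PySem.List.sorted (pvRems keys m) (fun x => x) false).Perm (pvRems keys m) :=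
      PySem.List.sorted_perm _ _ _
    have hpw : (PySem.List.sorted (pvRems keys m) (fun x => x) false).Pairwise (· ≤ ·) :=
      PySem.List.sorted_pairwise _ _
    have hb : pvColB keys m
        = ((PySem.Set.ofList (pvRems keys m)).countP
            (fun k => decide (((pvRems keys m).count k : Int) > 1)) : Int) := by
      rw [pvColB]
      have : (keys.map fun k => PySem.Int.mod k m) = pvRems keys m := rfl
      rw [this, pv_groups_sorted _ hpw]
      congr 1
      -- same distinct values (both Nodup, same membership) and same counts under the permutation
      have hmemperm : (PySem.Set.ofList (PySem.List.sorted (pvRems keys m) (fun x => x) false)).Perm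
          (PySem.Set.ofList (pvRems keys m)) := by
        rw [List.perm_ext_iff_of_nodup (PySem.Set.nodup_ofList _) (PySem.Set.nodup_ofList _)]
        intro k
        rw [PySem.Set.mem_ofList, PySem.Set.mem_ofList, hperm.mem_iff]
      rw [List.countP_congr
            (fun k _ => by rw [hperm.count_eq]),
          hmemperm.countP_eq]
    rw [hb, pv_colA_eq keys m hm, pv_countP_range_eq m hm]
    intro r hr
    obtain ⟨k, _, rfl⟩ := List.mem_map.mp hr
    exact ⟨PySem.Int.mod_nonneg k hm, PySem.Int.mod_lt k hm⟩
  · rw [pvColA, pvColB]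
    simp only [List.map_nil, List.foldl_nil]
    rw [PySem.List.foldl_ite_add_one (fun slot => slot > 1)]
    have h0 : (List.replicate m.toNat (0 : Int)).countP (fun slot => decide (slot > 1)) = 0 := by
      rw [List.countP_eq_zero]
      intro x hx
      rw [List.eq_of_mem_replicate hx]
      decide
    have hs : PySem.List.sorted ([] : List Int) (fun x => x) false = [] := rfl
    rw [h0, hs]
    simp [pvGroups]

-- ===== VERDICT (by name: the statement is the Claim_ definition above) =====
theorem modulo_hashing_analysis_spec : Claim_equal_modulo_hashing_analysis := by
  intro keys m_values _ hpre
  unfold Spec_modulo_hashing_analysis modulo_hashing_analysis modulo_hashing_analysis_alt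
  congr 1
  apply PySem.List.foldl_congr_mem
  intro d m hm
  have hcol : pvColA keys m = pvColB keys m := by
    apply pv_col_eq
    rcases hpre with rfl | hall
    · exact Or.inr rfl
    · exact Or.inl (hall m hm)
  rw [hcol]
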